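-- pv_equiv track=rewrite | github.com/taskcluster/taskcluster | taskcluster/utils.py | scope_match
-- ===== SOURCE A (Python) =====
-- def scope_match(assumed_scopes, required_scope_sets):
--     """
--         Take a list of a assumed scopes, and a list of required scope sets on
--         disjunctive normal form, and check if any of the required scope sets are
--         satisfied.
--
--         Example:
--
--             required_scope_sets = [
--                 ["scopeA", "scopeB"],
--                 ["scopeC"]
--             ]
--
--         In this case assumed_scopes must contain, either:
--         "scopeA" AND "scopeB", OR just "scopeC".
--     """
--     for scope_set in required_scope_sets:
--         for required_scope in scope_set:
--             for scope in assumed_scopes: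
--                 if scope == required_scope:
--                     break  # required_scope satisifed, no need to check more scopes
--                 if scope.endswith("*") and required_scope.startswith(scope[:-1]):
--                     break  # required_scope satisifed, no need to check more scopes
--             else:
--                 break      # required_scope not satisfied, stop checking scope_set
--         else:
--             return True    # scope_set satisfied, so we're happy
--     return False           # none of the required_scope_sets were satisfied
-- ===== SOURCE B (Python) =====
-- def scope_match(assumed_scopes, required_scope_sets):
--     exact = set(assumed_scopes)
--     wild = set(s[:-1] for s in assumed_scopes if s.endswith("*"))
--
--     def satisfied(r):
--         return r in exact or any(r[:i] in wild for i in range(len(r) + 1))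
--
--     return any(all(satisfied(r) for r in ss) for ss in required_scope_sets)
-- ===== Notes on version B (the rewrite author's own statement) =====
-- stated objective: faster
-- what changed: Preprocesses assumed scopes once into an exact-match hash set and a hash set of wildcard prefixes, then answers each required scope by one set lookup plus prefix-of-r lookups, replacing the inner scan over all assumed scopes.
import Mathlib
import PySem

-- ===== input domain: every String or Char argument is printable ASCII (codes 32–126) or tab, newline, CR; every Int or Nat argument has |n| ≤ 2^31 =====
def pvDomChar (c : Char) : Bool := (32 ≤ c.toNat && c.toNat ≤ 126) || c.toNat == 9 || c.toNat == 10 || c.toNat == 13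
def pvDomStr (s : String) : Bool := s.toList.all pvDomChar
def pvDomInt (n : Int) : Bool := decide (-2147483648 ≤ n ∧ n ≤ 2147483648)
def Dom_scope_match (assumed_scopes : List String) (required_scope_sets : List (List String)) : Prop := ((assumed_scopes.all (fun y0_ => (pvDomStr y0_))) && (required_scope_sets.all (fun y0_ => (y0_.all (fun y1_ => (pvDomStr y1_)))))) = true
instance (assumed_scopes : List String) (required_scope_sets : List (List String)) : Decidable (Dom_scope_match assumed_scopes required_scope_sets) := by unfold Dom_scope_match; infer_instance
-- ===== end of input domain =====

-- B preprocesses the assumed scopes once into an exact-match set and a set of wildcard prefixes,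
-- then answers each required scope by set lookups instead of A's inner scan over all assumed scopes.

-- ===== PORT A =====
-- A's inner 'for scope in assumed_scopes' loop with its for-else: true = required satisfied
def pvSatA (assumed : List String) (required : String) : Bool :=
  match assumed with
  | [] => false
  | s :: rest =>
    if s == required then true
    else if PySem.Str.endswith s "*" && PySem.Str.startswith required (PySem.Str.slice s none (some (-1))) then true
    else pvSatA rest required

-- A's middle 'for required_scope in scope_set' loop with its for-else: true = scope_set satisfied
def pvSetA (assumed : List String) (scope_set : List String) : Bool :=
  match scope_set with
  | [] => true
  | r :: rest => if pvSatA assumed r then pvSetA assumed rest else false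

def scope_match (assumed_scopes : List String) (required_scope_sets : List (List String)) : Bool :=
  match required_scope_sets with
  | [] => false
  | ss :: rest => if pvSetA assumed_scopes ss then true else scope_match assumed_scopes rest

-- ===== PORT B =====
-- wild = set(s[:-1] for s in assumed_scopes if s.endswith("*"))
def pvWild (assumed : List String) : PySem.Set String :=
  PySem.Set.ofList ((assumed.filter (fun s => PySem.Str.endswith s "*")).map
    (fun s => PySem.Str.slice s none (some (-1))))

-- satisfied(r) = r in exact or any(r[:i] in wild for i in range(len(r) + 1))
def pvSatB (exact : PySem.Set String) (wild : PySem.Set String) (r : String) : Bool :=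
  PySem.Set.contains exact r ||
    (List.range (r.toList.length + 1)).any
      (fun i => PySem.Set.contains wild (PySem.Str.slice r none (some (i : Int))))

def scope_match_alt (assumed_scopes : List String) (required_scope_sets : List (List String)) : Bool :=
  let exact := PySem.Set.ofList assumed_scopes
  let wild := pvWild assumed_scopes
  required_scope_sets.any (fun ss => ss.all (fun r => pvSatB exact wild r))

-- ===== PRECONDITION & SPEC =====
def Spec_scope_match (assumed_scopes : List String) (required_scope_sets : List (List String)) (out : Bool) : Prop := out = scope_match_alt assumed_scopes required_scope_sets
instance (assumed_scopes : List String) (required_scope_sets : List (List String)) (out : Bool) : Decidable (Spec_scope_match assumed_scopes required_scope_sets out) := by unfold Spec_scope_match; infer_instance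

-- ===== CLAIM (what is proved, stated in full; the proofs are below) =====
def Claim_equal_scope_match : Prop := ∀ (assumed_scopes : List String) (required_scope_sets : List (List String)), Dom_scope_match assumed_scopes required_scope_sets → Spec_scope_match assumed_scopes required_scope_sets (scope_match assumed_scopes required_scope_sets)

-- ===== LEMMAS AND PROOFS =====

theorem pv_if_if_or (a b c : Bool) :
    (if a then true else if b then true else c) = (a || b || c) := by
  cases a <;> cases b <;> simp

-- A's inner loop succeeds iff r is assumed exactly or matched by some wildcard scope
theorem pvSatA_iff (assumed : List String) (r : String) :
    pvSatA assumed r = true ↔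
      r ∈ assumed ∨ ∃ s ∈ assumed, PySem.Str.endswith s "*" = true ∧
        PySem.Str.startswith r (PySem.Str.slice s none (some (-1))) = true := by
  induction assumed with
  | nil => simp [pvSatA]
  | cons s rest ih =>
    rw [pvSatA, pv_if_if_or, Bool.or_eq_true, Bool.or_eq_true, Bool.and_eq_true, ih]
    simp only [beq_iff_eq, List.mem_cons]
    constructor
    · rintro ((rfl | h2) | (hm | ⟨t, ht, hp⟩))
      · exact Or.inl (Or.inl rfl)
      · exact Or.inr ⟨s, Or.inl rfl, h2⟩
      · exact Or.inl (Or.inr hm)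
      · exact Or.inr ⟨t, Or.inr ht, hp⟩
    · rintro ((rfl | hm) | ⟨t, (rfl | ht), hp⟩)
      · exact Or.inl (Or.inl rfl)
      · exact Or.inr (Or.inl hm)
      · exact Or.inl (Or.inr hp)
      · exact Or.inr (Or.inr ⟨t, ht, hp⟩)

-- the prefixes r[:i], i ≤ len(r), are exactly the strings r startswith
theorem pv_prefix_slice_iff (r p : String) :
    (∃ i < r.toList.length + 1, PySem.Str.slice r none (some (i : Int)) = p) ↔
      PySem.Str.startswith r p = true := by
  constructor
  · rintro ⟨i, _, rfl⟩
    simp only [PySem.Str.startswith_eq]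
    rw [PySem.Chars.startswith_iff]
    rw [show (PySem.Str.slice r none (some (i : Int))).toList = r.toList.take i by simp [pysem]]
    exact List.take_prefix i r.toList
  · intro h
    have hp : p.toList <+: r.toList := by
      rw [← PySem.Chars.startswith_iff]; simpa using h
    refine ⟨p.toList.length, by have := hp.length_le; omega, ?_⟩
    apply String.toList_inj.mp
    rw [show (PySem.Str.slice r none (some ((p.toList.length : Nat) : Int))).toList
          = r.toList.take p.toList.length by simp [pysem]]
    exact (List.prefix_iff_eq_take.mp hp).symm

-- B's satisfied(r) decides the same predicate
theorem pvSatB_iff (assumed : List String) (r : String) :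
    pvSatB (PySem.Set.ofList assumed) (pvWild assumed) r = true ↔
      r ∈ assumed ∨ ∃ s ∈ assumed, PySem.Str.endswith s "*" = true ∧
        PySem.Str.startswith r (PySem.Str.slice s none (some (-1))) = true := by
  unfold pvSatB pvWild
  rw [Bool.or_eq_true, List.any_eq_true]
  apply or_congr
  · rw [PySem.Set.contains_iff, PySem.Set.mem_ofList]
  · constructor
    · rintro ⟨i, hi, hcon⟩
      rw [PySem.Set.contains_iff, PySem.Set.mem_ofList, List.mem_map] at hcon
      obtain ⟨s, hs, heq⟩ := hcon
      rw [List.mem_filter] at hs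
      refine ⟨s, hs.1, hs.2, ?_⟩
      rw [heq]
      exact (pv_prefix_slice_iff r _).mp ⟨i, List.mem_range.mp hi, rfl⟩
    · rintro ⟨s, hs, he, hst⟩
      obtain ⟨i, hi, hslice⟩ := (pv_prefix_slice_iff r _).mpr hst
      refine ⟨i, List.mem_range.mpr hi, ?_⟩
      rw [PySem.Set.contains_iff, PySem.Set.mem_ofList, List.mem_map]
      exact ⟨s, List.mem_filter.mpr ⟨hs, he⟩, hslice.symm⟩

theorem pvSat_eq (assumed : List String) (r : String) :
    pvSatA assumed r = pvSatB (PySem.Set.ofList assumed) (pvWild assumed) r := by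
  rw [Bool.eq_iff_iff, pvSatA_iff, pvSatB_iff]

theorem pvSetA_eq (assumed : List String) (ss : List String) :
    pvSetA assumed ss = ss.all (fun r => pvSatB (PySem.Set.ofList assumed) (pvWild assumed) r) := by
  induction ss with
  | nil => rfl
  | cons r rest ih =>
    rw [pvSetA, List.all_cons, pvSat_eq assumed r, ih]
    cases pvSatB (PySem.Set.ofList assumed) (pvWild assumed) r <;> simp

theorem pvMain_eq (assumed : List String) (sets : List (List String)) :
    scope_match assumed sets = scope_match_alt assumed sets := by
  show scope_match assumed sets
      = sets.any (fun ss => ss.all (fun r => pvSatB (PySem.Set.ofList assumed) (pvWild assumed) r))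
  induction sets with
  | nil => rfl
  | cons ss rest ih =>
    rw [scope_match, List.any_cons, pvSetA_eq assumed ss, ih]
    cases ss.all (fun r => pvSatB (PySem.Set.ofList assumed) (pvWild assumed) r) <;> simp

-- ===== VERDICT (by name: the statement is the Claim_ definition above) =====
theorem scope_match_spec : Claim_equal_scope_match := by
  intro assumed sets _
  exact pvMain_eq assumed sets
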